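-- pv_equiv track=rewrite | github.com/windseeker5/dpm | test/sse_performance_fix.py | add_response_import
-- ===== SOURCE A (Python) =====
-- def check_for_response_import(content):
--     """Check if Response is already imported from Flask"""
--     return 'from flask import' in content and 'Response' in content
--
-- def add_response_import(content):
--     """Add Response to Flask imports if not present"""
--     if check_for_response_import(content):
--         return content
--
--     lines = content.split('\n')
--
--     # Find the Flask import line
--     for i, line in enumerate(lines):
--         if line.strip().startswith('from flask import'):
--             # Add Response to the import
--             if 'Response' not in line:
--                 # Add Response to the end of the import
--                 import_end = line.rfind(')')
--                 if import_end != -1: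
--                     lines[i] = line[:import_end] + ', Response' + line[import_end:]
--                 else:
--                     lines[i] = line + ', Response'
--             break
--
--     return '\n'.join(lines)
-- ===== SOURCE B (Python) =====
-- def add_response_import(content):
--     """Add Response to Flask imports if not present"""
--     if 'from flask import' in content and 'Response' in content:
--         return content
--     out = []
--     rest = content
--     while True:
--         line, sep, tail = rest.partition('\n')
--         if line.strip().startswith('from flask import'):
--             out.append(_patch(line) + sep + tail)
--             break
--         out.append(line)
--         if not sep:
--             break
--         out.append(sep)
--         rest = tail
--     return ''.join(out)
--
--
-- def _patch(line):
--     if 'Response' in line: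
--         return line
--     head, paren, after = line.rpartition(')')
--     if paren:
--         return head + ', Response' + paren + after
--     return line + ', Response'
-- ===== Notes on version B (the rewrite author's own statement) =====
-- stated objective: alternative
-- what changed: Replaces A's split-into-a-line-list + enumerate-index loop that mutates the matched list entry and rejoins everything, with a single partition-driven scan that emits output pieces as it goes, splices Response before the last closing paren found via rpartition, and leaves the tail of the string untouched once the flask-import line is handled.
import Mathlib
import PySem

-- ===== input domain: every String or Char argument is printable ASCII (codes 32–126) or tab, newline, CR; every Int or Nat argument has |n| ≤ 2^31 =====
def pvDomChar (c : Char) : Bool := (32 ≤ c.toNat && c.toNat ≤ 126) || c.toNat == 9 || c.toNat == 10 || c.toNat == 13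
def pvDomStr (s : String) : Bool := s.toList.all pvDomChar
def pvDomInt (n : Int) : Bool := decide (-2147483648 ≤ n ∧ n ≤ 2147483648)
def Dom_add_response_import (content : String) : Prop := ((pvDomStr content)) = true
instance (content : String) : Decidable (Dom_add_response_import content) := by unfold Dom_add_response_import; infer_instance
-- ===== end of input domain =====

-- B replaces A's split-into-a-line-list + enumerate-index loop + rejoin with a single
-- partition-driven scan that emits output pieces as it goes and splices via rpartition
-- (objective: alternative; same linear cost).

-- ===== PORT A =====

-- line.strip().startswith('from flask import')
def ariCond (line : List Char) : Bool :=
  PySem.Chars.startswith (PySem.Chars.strip line) "from flask import".toList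

-- the for-i,line-in-enumerate(lines) loop with break: patch the first matching line, keep the rest
def ariLoopA : List (List Char) → List (List Char)
  | [] => []
  | line :: rest =>
    if ariCond line then
      (if PySem.Chars.isIn "Response".toList line = false then
        (let importEnd := PySem.Chars.rfind line ")".toList
         if importEnd ≠ -1 then
           PySem.List.slice line none (some importEnd) ++ ", Response".toList ++
             PySem.List.slice line (some importEnd) none
         else line ++ ", Response".toList)
      else line) :: rest
    else line :: ariLoopA rest

def add_response_import (content : String) : String :=
  if PySem.Str.isIn "from flask import" content && PySem.Str.isIn "Response" content then
    content
  else
    String.ofList (PySem.Chars.join "\n".toList (ariLoopA (PySem.Chars.splitOn content.toList "\n".toList)))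

-- ===== PORT B =====

-- _patch: rpartition(')') ported by hand (exact: split at the last ')', found by scanning the reversed line)
def ariPatchB (line : List Char) : List Char :=
  if PySem.Chars.isIn "Response".toList line then line
  else
    let rev := line.reverse
    let after := rev.takeWhile (fun c => c ≠ ')')
    match rev.dropWhile (fun c => c ≠ ')') with
    | [] => line ++ ", Response".toList
    | _ :: t => t.reverse ++ ", Response".toList ++ ')' :: after.reverse

-- the while loop: partition('\n') ported by hand (exact: take/drop at the first '\n');
-- Source B's out list of emitted pieces is kept here as the already-joined accumulator acc
def ariFixB (acc text : List Char) : List Char :=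
  let line := text.takeWhile (fun c => c ≠ '\n')
  if ariCond line then acc ++ (ariPatchB line ++ text.dropWhile (fun c => c ≠ '\n'))
  else
    match h : text.dropWhile (fun c => c ≠ '\n') with
    | [] => acc ++ line
    | _ :: t => ariFixB (acc ++ line ++ ['\n']) t
termination_by text.length
decreasing_by
  have h1 := List.length_dropWhile_le (fun c => decide (c ≠ '\n')) text
  rw [h] at h1
  simp at h1 ⊢
  omega

def add_response_import_alt (content : String) : String :=
  if PySem.Str.isIn "from flask import" content && PySem.Str.isIn "Response" content then
    content
  else
    String.ofList (ariFixB [] content.toList)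

-- ===== PRECONDITION & SPEC =====
def Spec_add_response_import (content : String) (out : String) : Prop := out = add_response_import_alt content
instance (content : String) (out : String) : Decidable (Spec_add_response_import content out) := by unfold Spec_add_response_import; infer_instance

-- ===== CLAIM (what is proved, stated in full; the proofs are below) =====
def Claim_equal_add_response_import : Prop := ∀ (content : String), Dom_add_response_import content → Spec_add_response_import content (add_response_import content)

-- ===== LEMMAS AND PROOFS =====

def mySplit (s : List Char) : List (List Char) :=
  match h : s.dropWhile (fun c => c ≠ '\n') with
  | [] => [s]
  | _ :: t => s.takeWhile (fun c => c ≠ '\n') :: mySplit t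
termination_by s.length
decreasing_by
  have h1 := List.length_dropWhile_le (fun c => decide (c ≠ '\n')) s
  rw [h] at h1; simp at h1 ⊢; omega

theorem mySplit_nil_case (s : List Char) (h : s.dropWhile (fun c => c ≠ '\n') = []) : mySplit s = [s] := by
  unfold mySplit
  split
  · rfl
  · rename_i x t heq; rw [h] at heq; cases heq

theorem mySplit_cons_case (s : List Char) (x : Char) (t : List Char)
    (h : s.dropWhile (fun c => c ≠ '\n') = x :: t) :
    mySplit s = s.takeWhile (fun c => c ≠ '\n') :: mySplit t := by
  unfold mySplit
  split
  · rename_i heq; rw [h] at heq; cases heq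
  · rename_i y t2 heq; rw [h] at heq; cases heq; congr 1; rw [mySplit]

theorem takeWhile_append_of_all {p : Char → Bool} (a b : List Char) (h : ∀ x ∈ a, p x = true) :
    (a ++ b).takeWhile p = a ++ b.takeWhile p := by
  induction a with
  | nil => simp
  | cons x xs ih => simp_all

theorem dropWhile_append_of_all {p : Char → Bool} (a b : List Char) (h : ∀ x ∈ a, p x = true) :
    (a ++ b).dropWhile p = b.dropWhile p := by
  induction a with
  | nil => simp
  | cons x xs ih => simp_all

theorem mySplit_no_nl (s : List Char) (h : '\n' ∉ s) : mySplit s = [s] := by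
  apply mySplit_nil_case
  rw [List.dropWhile_eq_nil_iff]
  intro x hx; simp; rintro rfl; exact h hx

theorem mySplit_append (p t : List Char) (h : '\n' ∉ p) :
    mySplit (p ++ '\n' :: t) = p :: mySplit t := by
  have hall : ∀ x ∈ p, (fun c => decide (c ≠ '\n')) x = true := by
    intro x hx; simp; rintro rfl; exact h hx
  rw [mySplit_cons_case (p ++ '\n' :: t) '\n' t]
  · rw [takeWhile_append_of_all _ _ hall]; simp
  · rw [dropWhile_append_of_all _ _ hall]; simp

theorem splitOn_go_eq (fuel : Nat) (l cur : List Char) (acc : List (List Char))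
    (hf : l.length + 1 ≤ fuel) (hc : '\n' ∉ cur) :
    PySem.Chars.splitOn.go ['\n'] fuel l cur acc = acc.reverse ++ mySplit (cur.reverse ++ l) := by
  induction fuel generalizing l cur acc with
  | zero => omega
  | succ f ih =>
    match l with
    | [] =>
      rw [PySem.Chars.splitOn.go.eq_def]
      have h2 : '\n' ∉ cur.reverse := by simpa using hc
      simp [mySplit_no_nl _ h2]
    | c :: rest =>
      rw [PySem.Chars.splitOn.go.eq_def]
      by_cases hcnl : c = '\n'
      · subst hcnl
        have hpre : List.isPrefixOf ['\n'] ('\n' :: rest) = true := by simp [List.isPrefixOf]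
        simp only [hpre, if_pos]
        have hdrop : List.drop (['\n'] : List Char).length ('\n' :: rest) = rest := by simp
        rw [hdrop, ih rest [] ((cur.reverse) :: acc) (by simp at hf ⊢; omega) (by simp)]
        have h2 : '\n' ∉ cur.reverse := by simpa using hc
        rw [mySplit_append _ _ h2]
        simp
      · have hpre : List.isPrefixOf ['\n'] (c :: rest) = false := by
          simp [List.isPrefixOf]; exact fun h => absurd h.symm hcnl
        simp only [hpre, Bool.false_eq_true, if_false]
        rw [ih rest (c :: cur) acc (by simp at hf ⊢; omega) (by simp [hc]; exact fun h => hcnl h.symm)]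
        simp

theorem splitOn_eq_mySplit (s : List Char) :
    PySem.Chars.splitOn s ['\n'] = mySplit s := by
  rw [PySem.Chars.splitOn]
  rw [splitOn_go_eq (s.length + 1) s [] [] (by omega) (by simp)]
  simp

theorem rfind_go_none (s : List Char) (c : Char) (hc : c ∉ s) (k : Nat) :
    PySem.Chars.rfind.go s [c] k = -1 := by
  induction k with
  | zero =>
    rw [PySem.Chars.rfind.go]
    have : List.isPrefixOf [c] s = false := by
      cases s with
      | nil => rfl
      | cons x xs => simp [List.isPrefixOf]; intro h; exact absurd h.symm (by simp at hc; intro e; exact hc.1 e.symm)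
    simp [this]
  | succ j ih =>
    rw [PySem.Chars.rfind.go]
    have : List.isPrefixOf [c] (List.drop (j+1) s) = false := by
      cases hd : List.drop (j+1) s with
      | nil => rfl
      | cons x xs =>
        simp [List.isPrefixOf]
        intro h
        have : x ∈ s := by
          have : x ∈ List.drop (j+1) s := by rw [hd]; exact List.mem_cons_self
          exact List.mem_of_mem_drop this
        subst h; exact hc this
    simp [this, ih]

theorem rfind_go_last (p a : List Char) (c : Char) (ha : c ∉ a) (k : Nat) (hk : p.length ≤ k) :
    PySem.Chars.rfind.go (p ++ c :: a) [c] k = (p.length : Int) := by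
  induction k with
  | zero =>
    have hp : p = [] := by cases p with | nil => rfl | cons x xs => simp at hk
    subst hp
    rw [PySem.Chars.rfind.go]
    simp [List.isPrefixOf]
  | succ j ih =>
    rw [PySem.Chars.rfind.go]
    by_cases hj : p.length ≤ j
    · have hgt : p.length < j + 1 := by omega
      have hd : List.drop (j+1) (p ++ c :: a) = List.drop (j - p.length) a := by
        rw [List.drop_append]
        have : List.drop (j+1) p = [] := by simp; omega
        rw [this]
        have hm : j + 1 - p.length = (j - p.length) + 1 := by omega
        rw [hm]
        simp
      have : List.isPrefixOf [c] (List.drop (j+1) (p ++ c :: a)) = false := by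
        rw [hd]
        cases hdd : List.drop (j - p.length) a with
        | nil => rfl
        | cons x xs =>
          simp [List.isPrefixOf]
          intro h
          have hx : x ∈ a := List.mem_of_mem_drop (by rw [hdd]; exact List.mem_cons_self)
          subst h; exact ha hx
      simp [this, ih hj]
    · have hj' : j + 1 = p.length := by omega
      have hd : List.drop (j+1) (p ++ c :: a) = c :: a := by
        rw [hj', List.drop_append_of_le_length (by omega)]
        simp
      rw [hd]
      simp [List.isPrefixOf, hj']

theorem rfind_no (l : List Char) (c : Char) (hc : c ∉ l) : PySem.Chars.rfind l [c] = -1 := by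
  rw [PySem.Chars.rfind]; exact rfind_go_none l c hc l.length

theorem rfind_last (p a : List Char) (c : Char) (ha : c ∉ a) :
    PySem.Chars.rfind (p ++ c :: a) [c] = (p.length : Int) := by
  rw [PySem.Chars.rfind]
  exact rfind_go_last p a c ha _ (by simp)

theorem head_dropWhile_cons {p : Char → Bool} (l : List Char) (x : Char) (t : List Char)
    (h : l.dropWhile p = x :: t) : p x = false := by
  have hw : l.dropWhile p ≠ [] := by rw [h]; simp
  have h1 := List.head_dropWhile_not p hw
  have h2 : (l.dropWhile p).head hw = x := by simp [h]
  rw [h2] at h1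
  exact h1

theorem patch_eq (line : List Char) :
    (if PySem.Chars.isIn "Response".toList line = false then
      (if PySem.Chars.rfind line ")".toList ≠ -1 then
         PySem.List.slice line none (some (PySem.Chars.rfind line ")".toList)) ++ ", Response".toList ++
           PySem.List.slice line (some (PySem.Chars.rfind line ")".toList)) none
       else line ++ ", Response".toList)
    else line) = ariPatchB line := by
  rw [ariPatchB]
  by_cases hresp : PySem.Chars.isIn "Response".toList line = true
  · rw [hresp, if_pos rfl]
    simp
  · simp only [Bool.not_eq_true] at hresp
    rw [hresp]
    simp only [Bool.false_eq_true, if_false]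
    have htl : (")".toList : List Char) = [')'] := rfl
    rw [htl]
    cases hdw : line.reverse.dropWhile (fun c => decide (c ≠ ')')) with
    | nil =>
      have hno : ')' ∉ line := by
        intro hm
        have hm' : ')' ∈ line.reverse := by simpa using hm
        have := List.dropWhile_eq_nil_iff.mp hdw ')' hm'
        simp at this
      rw [rfind_no line ')' hno]
      simp
    | cons x t =>
      have hx : x = ')' := by
        have := head_dropWhile_cons line.reverse x t hdw
        simpa using this
      subst hx
      have hsplit : line.reverse = line.reverse.takeWhile (fun c => decide (c ≠ ')')) ++ ')' :: t := by
        conv_lhs => rw [← List.takeWhile_append_dropWhile (p := fun c => decide (c ≠ ')')) (l := line.reverse)]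
        rw [hdw]
      have hline : line = t.reverse ++ ')' :: (line.reverse.takeWhile (fun c => decide (c ≠ ')'))).reverse := by
        have := congrArg List.reverse hsplit
        simpa using this
      have hnota : ')' ∉ (line.reverse.takeWhile (fun c => decide (c ≠ ')'))).reverse := by
        intro hm
        have hm' := List.mem_takeWhile_imp (List.mem_reverse.mp hm)
        simp at hm'
      have hrf : PySem.Chars.rfind line [')'] = ((t.reverse).length : Int) := by
        rw [hline]; exact rfind_last _ _ _ hnota
      rw [hrf]
      have hlen : ((t.reverse.length : Int)) ≠ -1 := by omega
      simp only [hlen, ne_eq, not_false_iff, Bool.false_eq_true, if_false, if_pos]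
      rw [PySem.List.slice_to line (Int.natCast_nonneg _), PySem.List.slice_from line (Int.natCast_nonneg _)]
      simp only [Int.toNat_natCast]
      have h1 : line.take t.reverse.length = t.reverse := by
        conv_lhs => rw [hline]
        exact List.take_left
      have h2 : line.drop t.reverse.length = ')' :: (line.reverse.takeWhile (fun c => decide (c ≠ ')'))).reverse := by
        conv_lhs => rw [hline]
        exact List.drop_left
      rw [h1, h2]

theorem ariLoopA_ne_nil (ls : List (List Char)) (h : ls ≠ []) : ariLoopA ls ≠ [] := by
  cases ls with
  | nil => simp at h
  | cons x t => rw [ariLoopA]; split <;> simp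

theorem mySplit_ne_nil (s : List Char) : mySplit s ≠ [] := by
  unfold mySplit; split <;> simp

theorem join_singleton' (x : List Char) : PySem.Chars.join ['\n'] [x] = x := by
  simp [PySem.Chars.join, List.intercalate]

theorem join_cons_ne (x : List Char) (ys : List (List Char)) (h : ys ≠ []) :
    PySem.Chars.join ['\n'] (x :: ys) = x ++ '\n' :: PySem.Chars.join ['\n'] ys := by
  cases ys with
  | nil => simp at h
  | cons y t => simp [PySem.Chars.join, List.intercalate]

theorem takeWhile_of_dropWhile_nil (s : List Char) (h : s.dropWhile (fun c => c ≠ '\n') = []) :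
    s.takeWhile (fun c => (c ≠ '\n' : Bool)) = s := by
  conv_rhs => rw [← List.takeWhile_append_dropWhile (p := fun c => decide (c ≠ '\n')) (l := s), h]
  simp

theorem join_mySplit (s : List Char) : PySem.Chars.join ['\n'] (mySplit s) = s := by
  induction s using mySplit.induct with
  | case1 s h =>
    rw [mySplit_nil_case s h, join_singleton']
  | case2 s x t h ih =>
    have hx : x = '\n' := by
      have := head_dropWhile_cons s x t h
      simpa using this
    subst hx
    rw [mySplit_cons_case s '\n' t h, join_cons_ne _ _ (mySplit_ne_nil t), ih]
    conv_rhs => rw [← List.takeWhile_append_dropWhile (p := fun c => decide (c ≠ '\n')) (l := s), h]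

theorem fixB_eq (text acc : List Char) :
    ariFixB acc text = acc ++ PySem.Chars.join ['\n'] (ariLoopA (mySplit text)) := by
  induction text using mySplit.induct generalizing acc with
  | case1 s h =>
    have hline := takeWhile_of_dropWhile_nil s h
    rw [ariFixB, mySplit_nil_case s h]
    simp only [hline]
    rw [ariLoopA]
    by_cases hc : ariCond s
    · simp only [hc, if_pos]
      rw [join_singleton', patch_eq, h]
      simp
    · simp only [hc, Bool.false_eq_true, if_false]
      split
      · rw [show ariLoopA ([] : List (List Char)) = ([] : List (List Char)) from rfl, join_singleton']
      · rename_i heq; rw [h] at heq; cases heq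
  | case2 s x t h ih =>
    have hx : x = '\n' := by
      have := head_dropWhile_cons s x t h
      simpa using this
    subst hx
    have hms : mySplit s = s.takeWhile (fun c => decide (c ≠ '\n')) :: mySplit t :=
      mySplit_cons_case s '\n' t h
    rw [ariFixB, hms, ariLoopA]
    by_cases hc : ariCond (s.takeWhile (fun c => decide (c ≠ '\n')))
    · simp only [hc, if_pos]
      rw [join_cons_ne _ _ (mySplit_ne_nil t), join_mySplit, patch_eq, h]
    · simp only [hc, Bool.false_eq_true, if_false]
      split
      · rename_i heq; rw [h] at heq; cases heq
      · rename_i y t2 heq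
        rw [h] at heq; cases heq
        rw [join_cons_ne _ _ (ariLoopA_ne_nil _ (mySplit_ne_nil t)), ih]
        simp

theorem lists_eq (s : List Char) :
    PySem.Chars.join "\n".toList (ariLoopA (PySem.Chars.splitOn s "\n".toList)) = ariFixB [] s := by
  rw [show ("\n".toList : List Char) = ['\n'] from rfl, splitOn_eq_mySplit, fixB_eq]
  simp

-- ===== VERDICT (by name: the statement is the Claim_ definition above) =====
theorem add_response_import_spec : Claim_equal_add_response_import := by
  intro content _
  unfold Spec_add_response_import add_response_import add_response_import_alt
  by_cases hg : (PySem.Str.isIn "from flask import" content && PySem.Str.isIn "Response" content) = true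
  · rw [hg]; simp
  · simp only [Bool.not_eq_true] at hg
    rw [hg]
    simp only [Bool.false_eq_true, if_false]
    rw [lists_eq]
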